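-- pv_equiv track=rewrite | github.com/Kasarlakavyasri/Pichus | arrange_pichus.py | Dcheck
-- ===== SOURCE A (Python) =====
-- def Dcheck(house_map,r,c):
--     if(0<=r<len(house_map) and (0<= c <len(house_map[0]))):
--         if house_map[r][c] in "X@":
--             return True
--         elif house_map[r][c]=="p":
--             return False
--         else:
--             return Dcheck(house_map,r+1,c)
--     return True
-- ===== SOURCE B (Python) =====
-- def Dcheck(house_map, r, c):
--     # One-time bounds check, then a single loop over the rows from r downward.
--     if not house_map or not (0 <= c < len(house_map[0])):
--         return True
--     if r < 0:
--         return True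
--     for row in house_map[r:]:
--         ch = row[c]
--         if ch in "X@":
--             return True
--         if ch == "p":
--             return False
--     return True
-- ===== Notes on version B (the rewrite author's own statement) =====
-- stated objective: simpler
-- what changed: Replaced the index-based tail recursion that re-checks both bounds at every step with a one-time bounds check followed by a single for-loop over the sliced tail of rows house_map[r:].
-- outside the precondition, e.g. on Dcheck(['pp', ''], 0, 1): A returns False, B returns False
import Mathlib
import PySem

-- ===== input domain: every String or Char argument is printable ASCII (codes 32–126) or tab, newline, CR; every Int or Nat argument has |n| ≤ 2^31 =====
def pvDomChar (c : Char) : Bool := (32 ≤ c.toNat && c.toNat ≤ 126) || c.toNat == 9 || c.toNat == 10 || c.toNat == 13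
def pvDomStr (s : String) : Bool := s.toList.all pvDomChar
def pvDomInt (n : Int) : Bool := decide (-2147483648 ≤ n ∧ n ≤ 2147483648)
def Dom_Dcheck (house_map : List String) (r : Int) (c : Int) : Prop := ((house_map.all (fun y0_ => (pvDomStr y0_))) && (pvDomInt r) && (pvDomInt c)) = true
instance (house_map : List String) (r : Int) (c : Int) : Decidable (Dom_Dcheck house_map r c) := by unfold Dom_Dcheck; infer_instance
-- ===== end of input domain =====

-- B replaces A's bounds-rechecking tail recursion by a one-time bounds check and a single scan of the sliced tail rows (objective: simpler).


-- ===== PORT A =====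
def Dcheck (house_map : List String) (r : Int) (c : Int) : Bool :=
  if 0 ≤ r ∧ r < (house_map.length : Int) ∧ 0 ≤ c ∧ c < ((house_map.headD "").toList.length : Int) then
    match PySem.Str.pyGet? (house_map.getD r.toNat "") c with
    | some ch =>
      if ch = 'X' ∨ ch = '@' then true
      else if ch = 'p' then false
      else Dcheck house_map (r + 1) c
    | none => true    -- IndexError in Python (ragged row shorter than row 0); excluded by Pre_
  else true
termination_by (house_map.length - r.toNat)
decreasing_by omega

-- ===== PORT B =====
-- the for-loop of Source B over the remaining rows
def scanCol : List String → Int → Bool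
  | [], _ => true
  | row :: rest, c =>
    match PySem.Str.pyGet? row c with
    | some ch =>
      if ch = 'X' ∨ ch = '@' then true
      else if ch = 'p' then false
      else scanCol rest c
    | none => true    -- IndexError in Python; excluded by Pre_

def Dcheck_alt (house_map : List String) (r : Int) (c : Int) : Bool :=
  if house_map = [] then true
  else if ¬ (0 ≤ c ∧ c < ((house_map.headD "").toList.length : Int)) then true
  else if r < 0 then true
  else scanCol (PySem.List.slice house_map (some r) none) c

-- ===== PRECONDITION & SPEC =====
-- Pre_ excludes in-bounds starts over ragged maps where some row at index ≥ r is shorter than c+1: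
-- there the downward scan may hit a short row and raise IndexError in Python; scans that stop at a
-- blocker/pichu before reaching the short row do return and are conservatively excluded too.
def Pre_Dcheck (house_map : List String) (r : Int) (c : Int) : Prop :=
  (0 ≤ r ∧ r < (house_map.length : Int) ∧ 0 ≤ c ∧ c < ((house_map.headD "").toList.length : Int)) →
    ∀ s ∈ house_map.drop r.toNat, c < (s.toList.length : Int)
instance (house_map : List String) (r : Int) (c : Int) : Decidable (Pre_Dcheck house_map r c) := by unfold Pre_Dcheck; infer_instance

def pvWitness_Dcheck : List String × Int × Int := (["X.p", "..@"], 0, 1)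

def Spec_Dcheck (house_map : List String) (r : Int) (c : Int) (out : Bool) : Prop := out = Dcheck_alt house_map r c
instance (house_map : List String) (r : Int) (c : Int) (out : Bool) : Decidable (Spec_Dcheck house_map r c out) := by unfold Spec_Dcheck; infer_instance

-- ===== CLAIM (what is proved, stated in full; the proofs are below) =====
def Claim_equal_Dcheck : Prop := ∀ (house_map : List String) (r : Int) (c : Int), Dom_Dcheck house_map r c → Pre_Dcheck house_map r c → Spec_Dcheck house_map r c (Dcheck house_map r c)

-- ===== LEMMAS AND PROOFS =====

-- In the in-column regime, A's recursion from row r computes B's scan of the dropped tail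
-- (fuel k bounds the number of remaining rows).
theorem dcheck_eq_scan (house_map : List String) (c : Int)
    (hc : 0 ≤ c ∧ c < ((house_map.headD "").toList.length : Int)) :
    ∀ (k : Nat) (r : Int), house_map.length - r.toNat ≤ k → 0 ≤ r →
      (∀ s ∈ house_map.drop r.toNat, c < (s.toList.length : Int)) →
      Dcheck house_map r c = scanCol (house_map.drop r.toNat) c := by
  intro k
  induction k with
  | zero =>
    intro r hk hr _
    have hge : house_map.length ≤ r.toNat := by omega
    rw [Dcheck, List.drop_eq_nil_of_le hge]
    simp [scanCol]
    omega
  | succ k ih =>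
    intro r hk hr hlen
    by_cases hrlt : r < (house_map.length : Int)
    · have hnat : r.toNat < house_map.length := by omega
      have hdrop := List.drop_eq_getElem_cons hnat
      have hmem : house_map[r.toNat] ∈ house_map.drop r.toNat := by
        rw [hdrop]; exact List.mem_cons_self
      have hrowlen := hlen _ hmem
      have hget : PySem.Str.pyGet? (house_map.getD r.toNat "") c
          = some (house_map[r.toNat]).toList[c.toNat] := by
        rw [List.getD_eq_getElem house_map "" hnat]
        simp [PySem.Str.pyGet?]
        rw [PySem.List.pyGet?_eq_some_getElem _ hc.1 (by exact_mod_cast hrowlen)]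
      have hlen' : ∀ s ∈ house_map.drop (r + 1).toNat, c < (s.toList.length : Int) := by
        intro s hs
        apply hlen
        have : (r + 1).toNat = r.toNat + 1 := by omega
        rw [hdrop]
        exact List.mem_cons_of_mem _ (this ▸ hs)
      have ih' := ih (r + 1) (by omega) (by omega) hlen'
      rw [Dcheck]
      rw [if_pos ⟨hr, hrlt, hc⟩, hget]
      rw [hdrop]
      have h1 : (r + 1).toNat = r.toNat + 1 := by omega
      rw [ih', h1]
      have hget2 : PySem.Str.pyGet? house_map[r.toNat] c = some house_map[r.toNat].toList[c.toNat] := by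
        show PySem.List.pyGet? house_map[r.toNat].toList c = _
        exact PySem.List.pyGet?_eq_some_getElem _ hc.1 (by exact_mod_cast hrowlen)
      simp only [scanCol]
      rw [hget2]
    · have hge : house_map.length ≤ r.toNat := by omega
      rw [Dcheck, List.drop_eq_nil_of_le hge]
      simp [scanCol]
      omega

-- ===== VERDICT =====
theorem Dcheck_spec : Claim_equal_Dcheck := by
  intro house_map r c _ hpre
  unfold Spec_Dcheck Dcheck_alt
  by_cases hcond : 0 ≤ r ∧ r < (house_map.length : Int) ∧ 0 ≤ c ∧ c < ((house_map.headD "").toList.length : Int)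
  · obtain ⟨hr, hrlt, hc⟩ := hcond
    have hlen := hpre ⟨hr, hrlt, hc⟩
    have hne : house_map ≠ [] := by
      intro h; subst h; simp at hrlt; omega
    have hslice : PySem.List.slice house_map (some r) none = house_map.drop r.toNat := by
      rw [show r = ((r.toNat : Nat) : Int) by omega, PySem.List.slice_from_natCast]
      congr 1
    rw [if_neg hne, if_neg (not_not_intro hc), if_neg (by omega), hslice]
    exact dcheck_eq_scan house_map c hc house_map.length r (by omega) hr hlen
  · have hA : Dcheck house_map r c = true := by
      rw [Dcheck]; rw [if_neg hcond]
    rw [hA]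
    by_cases hnil : house_map = []
    · rw [if_pos hnil]
    · rw [if_neg hnil]
      by_cases hc : 0 ≤ c ∧ c < ((house_map.headD "").toList.length : Int)
      · rw [if_neg (not_not_intro hc)]
        by_cases hrneg : r < 0
        · rw [if_pos hrneg]
        · rw [if_neg hrneg]
          have hge : house_map.length ≤ r.toNat := by
            rcases not_and_or.mp hcond with h | h
            · omega
            · rcases not_and_or.mp h with h2 | h2
              · omega
              · exact absurd hc h2
          rw [show r = ((r.toNat : Nat) : Int) by omega, PySem.List.slice_from_natCast,
            List.drop_eq_nil_of_le hge]
          rfl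
      · rw [if_pos (by tauto)]
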